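-- pv_equiv track=rewrite | github.com/zephyus/gat_stable_dp_decay_torch270_cu128 | new_reward.py | passed_cars
-- ===== SOURCE A (Python) =====
-- def passed_cars(t1, t2):
--     count = 0
--     for t in t1[::-1]:
--         if len(t2) == 0:
--             return len(t1)
--         elif t2[len(t2)-1] == t:
--             break
--         count += 1
--     return count
-- ===== SOURCE B (Python) =====
-- def passed_cars(t1, t2):
--     n = len(t1)
--     if len(t2) == 0:
--         return n
--     target = t2[-1]
--     last = -1
--     for i, x in enumerate(t1):
--         if x == target:
--             last = i
--     if last == -1:
--         return n
--     return n - 1 - last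
-- ===== Notes on version B (the rewrite author's own statement) =====
-- stated objective: alternative
-- what changed: Hoists the empty-t2 guard out of the loop and replaces the backward early-break scan over a reversed copy with a forward full pass tracking the last index where t1[i] equals t2[-1], recovering the count as len(t1)-1-last.
import Mathlib
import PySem

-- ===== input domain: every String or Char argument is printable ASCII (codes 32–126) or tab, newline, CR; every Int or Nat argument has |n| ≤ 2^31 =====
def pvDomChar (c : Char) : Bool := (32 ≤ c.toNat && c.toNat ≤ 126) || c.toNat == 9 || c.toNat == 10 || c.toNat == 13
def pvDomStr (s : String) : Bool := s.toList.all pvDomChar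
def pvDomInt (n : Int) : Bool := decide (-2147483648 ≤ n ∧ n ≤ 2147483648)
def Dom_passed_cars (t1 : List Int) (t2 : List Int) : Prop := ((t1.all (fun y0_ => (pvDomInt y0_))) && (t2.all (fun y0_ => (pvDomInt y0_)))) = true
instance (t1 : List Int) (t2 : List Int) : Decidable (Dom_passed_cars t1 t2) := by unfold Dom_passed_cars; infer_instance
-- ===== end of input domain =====

-- B replaces A's backward early-break scan by a forward pass tracking the last match index
-- plus arithmetic; same O(n) cost, different decomposition (objective: alternative).

-- ===== PORT A =====
-- the 'for t in t1[::-1]' loop: early return of len(t1) on empty t2, break on match, else count += 1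
def passedLoopA (t1len : Int) (t2 : List Int) : List Int → Int → Int
  | [], count => count
  | t :: rest, count =>
    if t2.length == 0 then t1len
    else if PySem.List.pyGet? t2 ((t2.length : Int) - 1) == some t then count
    else passedLoopA t1len t2 rest (count + 1)

def passed_cars (t1 : List Int) (t2 : List Int) : Int :=
  -- t1[::-1] via slice?; step -1 is never 0, so getD's default is unreachable
  passedLoopA (t1.length : Int) t2 ((PySem.List.slice? t1 none none (-1)).getD []) 0

-- ===== PORT B =====
-- the 'for i, x in enumerate(t1)' loop keeping last = latest index with x == target
def lastIdxLoop (target : Int) : List Int → Int → Int → Int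
  | [], _, last => last
  | x :: rest, i, last => lastIdxLoop target rest (i + 1) (if x == target then i else last)

def passed_cars_alt (t1 : List Int) (t2 : List Int) : Int :=
  if t2.length == 0 then (t1.length : Int)
  else
    match PySem.List.pyGet? t2 (-1) with
    | none => 0  -- unreachable: t2 nonempty here
    | some target =>
      let last := lastIdxLoop target t1 0 (-1)
      if last == -1 then (t1.length : Int) else (t1.length : Int) - 1 - last

-- ===== PRECONDITION & SPEC =====
def Spec_passed_cars (t1 : List Int) (t2 : List Int) (out : Int) : Prop := out = passed_cars_alt t1 t2
instance (t1 : List Int) (t2 : List Int) (out : Int) : Decidable (Spec_passed_cars t1 t2 out) := by unfold Spec_passed_cars; infer_instance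

-- ===== CLAIM (what is proved, stated in full; the proofs are below) =====
def Claim_equal_passed_cars : Prop := ∀ (t1 : List Int) (t2 : List Int), Dom_passed_cars t1 t2 → Spec_passed_cars t1 t2 (passed_cars t1 t2)

-- ===== LEMMAS AND PROOFS =====

-- A's loop with accumulator c adds c to its run from 0
theorem passedLoopA_shift (t1len : Int) (t2 : List Int) (h : t2 ≠ []) :
    ∀ (l : List Int) (c : Int), passedLoopA t1len t2 l c = c + passedLoopA t1len t2 l 0 := by
  intro l
  induction l with
  | nil => intro c; simp [passedLoopA]
  | cons x rest ih =>
    intro c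
    simp only [passedLoopA]
    have h2 : (t2.length == 0) = false := by
      simp [List.length_eq_zero_iff, h]
    rw [h2]
    simp only [Bool.false_eq_true, if_false]
    by_cases hm : PySem.List.pyGet? t2 ((t2.length : Int) - 1) == some x
    · simp [hm]
    · simp only [hm, Bool.false_eq_true, if_false]
      rw [ih (c + 1), ih (0 + 1)]
      ring

-- B's last index loop over l ++ [x]
theorem lastIdxLoop_append (target x : Int) :
    ∀ (l : List Int) (i last : Int),
      lastIdxLoop target (l ++ [x]) i last =
        if x == target then i + (l.length : Int)
        else lastIdxLoop target l i last := by
  intro l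
  induction l with
  | nil => intro i last; simp [lastIdxLoop]
  | cons y rest ih =>
    intro i last
    simp only [List.cons_append, lastIdxLoop, ih, List.length_cons]
    by_cases hx : x == target
    · simp [hx]; ring
    · simp [hx]

-- main correspondence for nonempty t2 with target = its last element
theorem loops_agree (t1len : Int) (t2 : List Int) (h : t2 ≠ []) (target : Int)
    (htgt : PySem.List.pyGet? t2 ((t2.length : Int) - 1) = some target) :
    ∀ (l : List Int),
      passedLoopA t1len t2 l.reverse 0 =
        (if lastIdxLoop target l 0 (-1) == -1 then (l.length : Int)
         else (l.length : Int) - 1 - lastIdxLoop target l 0 (-1)) := by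
  intro l
  induction l using List.reverseRecOn with
  | nil => simp [passedLoopA, lastIdxLoop]
  | append_singleton rest x ih =>
    rw [List.reverse_append, lastIdxLoop_append]
    simp only [List.reverse_singleton, List.singleton_append, passedLoopA, List.length_append,
      List.length_singleton]
    have h2 : (t2.length == 0) = false := by simp [List.length_eq_zero_iff, h]
    rw [h2, htgt]
    simp only [Bool.false_eq_true, if_false]
    by_cases hx : x = target
    · subst hx
      have e1 : (some x == some x) = true := by simp
      have e2 : (x == x) = true := by simp
      rw [e1, e2, if_pos (rfl : true = true), if_pos (rfl : true = true)]
      rw [if_neg (by simp)]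
      push_cast; ring
    · have hb : (x == target) = false := by simpa using hx
      have hb' : (some target == some x) = false := by
        simp only [beq_eq_false_iff_ne, ne_eq, Option.some.injEq]
        exact fun e => hx e.symm
      rw [hb, hb']
      simp only [Bool.false_eq_true, if_false]
      rw [passedLoopA_shift t1len t2 h rest.reverse (0 + 1), ih]
      by_cases hl : lastIdxLoop target rest 0 (-1) == -1
      · rw [if_pos hl, if_pos hl]; push_cast; ring
      · have hl' : (lastIdxLoop target rest 0 (-1) == -1) = false := by simpa using hl
        rw [hl', if_neg (by simp_all)]
        simp only [Bool.false_eq_true, if_false]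
        push_cast; ring

-- ===== VERDICT (by name: the statement is the Claim_ definition above) =====
theorem passed_cars_spec : Claim_equal_passed_cars := by
  intro t1 t2 _
  unfold Spec_passed_cars passed_cars passed_cars_alt
  rw [PySem.List.slice?_none_none_neg_one]
  simp only [Option.getD_some]
  by_cases h : t2 = []
  · subst h
    simp only [List.length_nil]
    rw [if_pos (by decide)]
    by_cases h1 : t1 = []
    · subst h1; simp [passedLoopA]
    · have hr : t1.reverse ≠ [] := by simpa using h1
      obtain ⟨a, l, hl⟩ := List.exists_cons_of_ne_nil hr
      rw [hl]; simp [passedLoopA]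
  · have hlen : (t2.length == 0) = false := by simp [List.length_eq_zero_iff, h]
    rw [hlen]
    simp only [Bool.false_eq_true, if_false]
    obtain ⟨tg, htg⟩ : ∃ tg, t2.getLast? = some tg := by
      cases hgl : t2.getLast? with
      | none => exact absurd (List.getLast?_eq_none_iff.mp hgl) h
      | some v => exact ⟨v, rfl⟩
    have htgt : PySem.List.pyGet? t2 ((t2.length : Int) - 1) = some tg := by
      have h1 : ((t2.length : Int) - 1) = ((t2.length - 1 : Nat) : Int) := by
        have : 1 ≤ t2.length := List.length_pos_iff.mpr h
        omega
      rw [h1, PySem.List.pyGet?_natCast, ← List.getLast?_eq_getElem?, htg]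
    rw [PySem.List.pyGet?_neg_one, htg]
    exact loops_agree (t1.length : Int) t2 h tg htgt t1
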